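-- pv_equiv track=rewrite | github.com/meder1ss/algorithms | 23.py | f
-- ===== SOURCE A (Python) =====
-- def f(n):
--     cache = [0] * (n + 1)
--     for i in range(2, n + 1):
--         v = cache[i - 1]
--         if i % 2 == 0:
--             v = min(v, cache[i // 2])
--         if i % 3 == 0:
--             v = min(v, cache[i // 3])
--         cache[i] = v + 1
--     return cache
-- ===== SOURCE B (Python) =====
-- def f(n):
--     if n < 1:
--         return [0] * (n + 1)
--     cache = [n + 2] * (n + 1)
--     cache[0] = 0
--     cache[1] = 0
--     for i in range(1, n + 1):
--         c = cache[i] + 1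
--         if i + 1 <= n and c < cache[i + 1]:
--             cache[i + 1] = c
--         if 2 * i <= n and c < cache[2 * i]:
--             cache[2 * i] = c
--         if 3 * i <= n and c < cache[3 * i]:
--             cache[3 * i] = c
--     return cache
-- ===== Notes on version B (the rewrite author's own statement) =====
-- stated objective: alternative
-- what changed: Replaced the pull DP, where each cell reads its up-to-three predecessors, by a push DP that initialises the table with a sentinel and, in ascending order, relaxes each finalised cell's successors (next index, double and triple) with a min update.
import Mathlib
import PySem

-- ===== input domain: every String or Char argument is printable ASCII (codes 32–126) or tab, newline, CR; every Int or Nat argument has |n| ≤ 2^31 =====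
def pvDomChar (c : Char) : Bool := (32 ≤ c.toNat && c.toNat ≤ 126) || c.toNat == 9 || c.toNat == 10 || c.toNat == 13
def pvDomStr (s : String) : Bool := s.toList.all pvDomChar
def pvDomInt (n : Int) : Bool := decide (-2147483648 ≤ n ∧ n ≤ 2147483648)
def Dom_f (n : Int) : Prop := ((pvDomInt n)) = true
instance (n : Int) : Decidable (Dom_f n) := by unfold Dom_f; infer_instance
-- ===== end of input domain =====

-- B replaces A's pull DP (each cell reads predecessors i-1, i/2, i/3) by a push DP that
-- relaxes the successors i+1, 2*i, 3*i of each finalised cell; alternative decomposition.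

-- ===== PORT A =====
def f (n : Int) : List Int :=
  let cache := List.replicate (n + 1).toNat (0 : Int)
  (PySem.List.pyRange 2 (n + 1) 1).foldl (fun cache i =>
    let v := PySem.List.pyGetD cache (i - 1) 0
    let v := if i % 2 = 0 then min v (PySem.List.pyGetD cache (PySem.Int.floordiv i 2) 0) else v
    let v := if i % 3 = 0 then min v (PySem.List.pyGetD cache (PySem.Int.floordiv i 3) 0) else v
    PySem.List.pySetD cache i (v + 1)) cache

-- ===== PORT B =====
def f_alt (n : Int) : List Int :=
  if n < 1 then List.replicate (n + 1).toNat (0 : Int)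
  else
    let cache := List.replicate (n + 1).toNat (n + 2)
    let cache := PySem.List.pySetD cache 0 0
    let cache := PySem.List.pySetD cache 1 0
    (PySem.List.pyRange 1 (n + 1) 1).foldl (fun cache i =>
      let c := PySem.List.pyGetD cache i 0 + 1
      let cache := if i + 1 ≤ n ∧ c < PySem.List.pyGetD cache (i + 1) 0 then
          PySem.List.pySetD cache (i + 1) c else cache
      let cache := if 2 * i ≤ n ∧ c < PySem.List.pyGetD cache (2 * i) 0 then
          PySem.List.pySetD cache (2 * i) c else cache
      if 3 * i ≤ n ∧ c < PySem.List.pyGetD cache (3 * i) 0 then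
          PySem.List.pySetD cache (3 * i) c else cache) cache

-- ===== PRECONDITION & SPEC =====
def Spec_f (n : Int) (out : List Int) : Prop := out = f_alt n
instance (n : Int) (out : List Int) : Decidable (Spec_f n out) := by unfold Spec_f; infer_instance

-- ===== CLAIM (what is proved, stated in full; the proofs are below) =====
def Claim_equal_f : Prop := ∀ (n : Int), Dom_f n → Spec_f n (f n)

-- ===== LEMMAS AND PROOFS =====

-- the common recurrence: minimum number of ops to reach j from 1 (the DP value at index j)
def g : Nat → Int
  | 0 => 0
  | 1 => 0
  | (k+2) =>
      let v := g (k+1)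
      let v := if (k+2) % 2 = 0 then min v (g ((k+2)/2)) else v
      let v := if (k+2) % 3 = 0 then min v (g ((k+2)/3)) else v
      v + 1
decreasing_by all_goals omega

lemma g_two_add (k : Nat) : g (k+2) =
    (let v := g (k+1)
     let v := if (k+2) % 2 = 0 then min v (g ((k+2)/2)) else v
     let v := if (k+2) % 3 = 0 then min v (g ((k+2)/3)) else v
     v + 1) := by
  rw [g]

lemma g_nonneg : ∀ j, 0 ≤ g j := by
  intro j
  induction j using Nat.strong_induction_on with
  | _ j ih =>
    match j with
    | 0 => simp [g]
    | 1 => simp [g]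
    | (k+2) =>
      rw [g_two_add]
      have h1 := ih (k+1) (by omega)
      have h2 := ih ((k+2)/2) (by omega)
      have h3 := ih ((k+2)/3) (by omega)
      dsimp only
      split_ifs <;> omega

lemma g_le : ∀ j, 1 ≤ j → g j ≤ (j : Int) - 1 := by
  intro j
  induction j using Nat.strong_induction_on with
  | _ j ih =>
    match j with
    | 0 => intro h; exact absurd h (by omega)
    | 1 => intro _; simp [g]
    | (k+2) =>
      intro _
      rw [g_two_add]
      have h1 := ih (k+1) (by omega) (by omega)
      dsimp only
      have hc : ((k:Int)+1) - 1 ≤ ((k:Int)+2) - 1 := by omega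
      split_ifs <;> push_cast <;> omega

-- indexing a map-over-range table
lemma pyGetD_map_range (h : Nat → Int) (L j : Nat) (hj : j < L) :
    PySem.List.pyGetD ((List.range L).map h) (j : Int) 0 = h j := by
  simp [PySem.List.pyGetD_natCast, List.getD, hj]

lemma pySetD_map_range (h : Nat → Int) (L t : Nat) (v : Int) :
    PySem.List.pySetD ((List.range L).map h) (t : Int) v
      = (List.range L).map (fun j => if j = t then v else h j) := by
  rw [PySem.List.pySetD_natCast]
  apply List.ext_getElem
  · simp
  · intro j hj hj'
    simp only [List.getElem_set, List.getElem_map, List.getElem_range]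
    by_cases hjt : t = j <;> simp [hjt, Eq.comm]

-- ===== A side =====
def stepA (cache : List Int) (i : Int) : List Int :=
  let v := PySem.List.pyGetD cache (i - 1) 0
  let v := if i % 2 = 0 then min v (PySem.List.pyGetD cache (PySem.Int.floordiv i 2) 0) else v
  let v := if i % 3 = 0 then min v (PySem.List.pyGetD cache (PySem.Int.floordiv i 3) 0) else v
  PySem.List.pySetD cache i (v + 1)

def tblA (L t : Nat) : List Int := (List.range L).map (fun j => if j < t then g j else 0)

lemma f_eq_foldl (n : Int) :
    f n = (PySem.List.pyRange 2 (n + 1) 1).foldl stepA (List.replicate (n+1).toNat 0) := rfl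

lemma replicate_eq_tblA (L : Nat) : List.replicate L (0 : Int) = tblA L 2 := by
  apply List.ext_getElem
  · simp [tblA]
  · intro j hj hj'
    simp only [tblA, List.getElem_replicate, List.getElem_map, List.getElem_range]
    match j with
    | 0 => simp [g]
    | 1 => simp [g]
    | (k+2) => simp

lemma stepA_tbl (L t : Nat) (h2 : 2 ≤ t) (hL : t < L) :
    stepA (tblA L t) (t : Int) = tblA L (t+1) := by
  obtain ⟨k, rfl⟩ : ∃ k, t = k + 2 := ⟨t - 2, by omega⟩
  unfold stepA tblA
  have e1 : ((k+2 : Nat) : Int) - 1 = ((k+1 : Nat) : Int) := by push_cast; ring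
  have e2 : PySem.Int.floordiv ((k+2 : Nat) : Int) 2 = (((k+2)/2 : Nat) : Int) := by
    rw [PySem.Int.floordiv_eq_ediv_of_pos (by norm_num)]; omega
  have e3 : PySem.Int.floordiv ((k+2 : Nat) : Int) 3 = (((k+2)/3 : Nat) : Int) := by
    rw [PySem.Int.floordiv_eq_ediv_of_pos (by norm_num)]; omega
  have c2 : (((k+2 : Nat) : Int) % 2 = 0) ↔ ((k+2) % 2 = 0) := by omega
  have c3 : (((k+2 : Nat) : Int) % 3 = 0) ↔ ((k+2) % 3 = 0) := by omega
  rw [e1, e2, e3,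
      pyGetD_map_range _ _ _ (by omega),
      pyGetD_map_range _ _ _ (by omega),
      pyGetD_map_range _ _ _ (by omega),
      pySetD_map_range]
  simp only [c2, c3]
  apply List.map_congr_left
  intro j hj
  rw [List.mem_range] at hj
  by_cases hjt : j = k + 2
  · subst hjt
    rw [if_pos rfl, if_pos (show k + 2 < k + 2 + 1 by omega), g_two_add]
    have d1 : k + 1 < k + 2 := by omega
    have d2 : (k+2)/2 < k + 2 := by omega
    have d3 : (k+2)/3 < k + 2 := by omega
    rw [if_pos d1, if_pos d2, if_pos d3]
  · rw [if_neg hjt]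
    by_cases hlt : j < k + 2
    · rw [if_pos hlt, if_pos (show j < k + 2 + 1 by omega)]
    · rw [if_neg hlt, if_neg (show ¬ (j < k + 2 + 1) by omega)]

lemma A_loop (m : Nat) (hm : 1 ≤ m) : ∀ t : Nat, 2 ≤ t → t ≤ m + 1 →
    (PySem.List.pyRange 2 (t : Int) 1).foldl stepA (tblA (m+1) 2) = tblA (m+1) t := by
  intro t
  induction t with
  | zero => intro h; omega
  | succ t ih =>
    intro h2 hle
    by_cases ht : t < 2
    · have : t = 1 := by omega
      subst this
      rw [show ((2:Nat) : Int) = 2 by norm_num, PySem.List.pyRange_one_eq_nil (by norm_num)]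
      rfl
    · have hsplit : ((t+1 : Nat) : Int) = (t : Int) + 1 := by push_cast; ring
      rw [hsplit, PySem.List.pyRange_one_succ_right (by omega), List.foldl_append,
          ih (by omega) (by omega)]
      exact stepA_tbl (m+1) t (by omega) (by omega)

lemma fA_eq (m : Nat) (hm : 1 ≤ m) : f (m : Int) = tblA (m+1) (m+1) := by
  rw [f_eq_foldl, show ((m : Int) + 1).toNat = m + 1 by omega,
      replicate_eq_tblA, show (m : Int) + 1 = ((m+1 : Nat) : Int) by push_cast; ring]
  exact A_loop m hm (m+1) (by omega) (by omega)

-- ===== B side =====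
def stepB (n : Int) (cache : List Int) (i : Int) : List Int :=
  let c := PySem.List.pyGetD cache i 0 + 1
  let cache := if i + 1 ≤ n ∧ c < PySem.List.pyGetD cache (i + 1) 0 then
      PySem.List.pySetD cache (i + 1) c else cache
  let cache := if 2 * i ≤ n ∧ c < PySem.List.pyGetD cache (2 * i) 0 then
      PySem.List.pySetD cache (2 * i) c else cache
  if 3 * i ≤ n ∧ c < PySem.List.pyGetD cache (3 * i) 0 then
      PySem.List.pySetD cache (3 * i) c else cache

-- value of B's table at index j after relaxing from sources 1..k
def valB (n : Int) (k j : Nat) : Int :=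
  if j ≤ 1 then 0
  else
    let v := n + 2
    let v := if j - 1 ≤ k then min v (g (j-1) + 1) else v
    let v := if j % 2 = 0 ∧ j / 2 ≤ k then min v (g (j/2) + 1) else v
    if j % 3 = 0 ∧ j / 3 ≤ k then min v (g (j/3) + 1) else v

def tblB (m k : Nat) : List Int := (List.range (m+1)).map (valB (m : Int) k)

lemma falt_eq_foldl (m : Nat) (hm : 1 ≤ m) :
    f_alt (m : Int) = (PySem.List.pyRange 1 ((m : Int) + 1) 1).foldl (stepB (m : Int))
      (PySem.List.pySetD (PySem.List.pySetD (List.replicate ((m:Int)+1).toNat ((m:Int)+2)) 0 0) 1 0) := by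
  rw [f_alt, if_neg (by omega : ¬ ((m : Int) < 1))]
  rfl

lemma init_eq_tblB (m : Nat) (hm : 1 ≤ m) :
    PySem.List.pySetD (PySem.List.pySetD (List.replicate ((m:Int)+1).toNat ((m:Int)+2)) 0 0) 1 0
      = tblB m 0 := by
  rw [PySem.List.pySetD_of_nonneg _ _ (by norm_num), PySem.List.pySetD_of_nonneg _ _ (by norm_num),
      show ((m : Int) + 1).toNat = m + 1 by omega]
  apply List.ext_getElem
  · simp [tblB]
  · intro j hj hj'
    simp only [tblB, List.getElem_set, List.getElem_replicate, List.getElem_map,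
      List.getElem_range, Int.toNat_zero, Int.toNat_one]
    match j with
    | 0 => simp [valB]
    | 1 => simp [valB]
    | (k+2) =>
      have h1 : ¬ ((1:Nat) = k + 2) := by omega
      have h0 : ¬ ((0:Nat) = k + 2) := by omega
      simp only [h1, h0, if_false, valB]
      rw [if_neg (by omega), if_neg (by omega), if_neg (by omega), if_neg (by omega)]

-- once every predecessor of j has been relaxed, B's cell holds the DP value
lemma valB_eq_g (m k j : Nat) (hjk : j ≤ k + 1) (hjm : j ≤ m + 1) :
    valB (m : Int) k j = g j := by
  match j with
  | 0 => simp [valB, g]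
  | 1 => simp [valB, g]
  | (i+2) =>
    rw [valB, if_neg (by omega), g_two_add]
    have hd1 : i + 2 - 1 = i + 1 := by omega
    rw [hd1]
    have hg1 : g (i+1) ≤ ((i+1 : Nat) : Int) - 1 := g_le (i+1) (by omega)
    have hg2 : 0 ≤ g ((i+2)/2) := g_nonneg _
    have hg3 : 0 ≤ g ((i+2)/3) := g_nonneg _
    have hgm : g (i+1) + 1 ≤ (m : Int) + 2 := by
      have : ((i+1 : Nat) : Int) ≤ (m : Int) + 1 := by exact_mod_cast by omega
      omega
    simp only [eq_true (show i + 1 ≤ k from by omega),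
      eq_true (show (i+2)/2 ≤ k from by omega),
      eq_true (show (i+2)/3 ≤ k from by omega), and_true, if_true, min_def]
    split_ifs <;> omega

set_option maxHeartbeats 2000000 in
lemma valB_succ (m k j : Nat) (h2 : 2 ≤ j) :
    valB (m : Int) (k+1) j =
      if j = k+2 ∨ j = 2*k+2 ∨ j = 3*k+3 then
        min (valB (m : Int) k j) (g (k+1) + 1)
      else valB (m : Int) k j := by
  have hj1 : ¬ (j ≤ 1) := by omega
  by_cases c1 : j = k + 2
  · by_cases c2 : j = 2*k+2
    · -- overlap: k = 0, j = 2
      have hk : k = 0 := by omega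
      subst hk
      subst c1
      rw [if_pos (Or.inl rfl)]
      simp only [valB, g]
      norm_num
      all_goals (simp only [min_def]; split_ifs <;> omega)
    · -- j = k+2 only (so k ≥ 1)
      subst c1
      rw [if_pos (Or.inl rfl)]
      simp only [valB, if_neg hj1,
        show k + 2 - 1 = k + 1 from by omega,
        eq_true (show k + 1 ≤ k + 1 from by omega),
        eq_false (show ¬ (k + 1 ≤ k) from by omega),
        (propext (show ((k+2) % 2 = 0 ∧ (k+2)/2 ≤ k+1) ↔ ((k+2) % 2 = 0 ∧ (k+2)/2 ≤ k) from by omega)),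
        (propext (show ((k+2) % 3 = 0 ∧ (k+2)/3 ≤ k+1) ↔ ((k+2) % 3 = 0 ∧ (k+2)/3 ≤ k) from by omega)),
        if_true, if_false, min_def]
      split_ifs <;> omega
  · by_cases c2 : j = 2*k+2
    · -- j = 2k+2 only (k ≥ 1 since j ≠ k+2)
      subst c2
      rw [if_pos (Or.inr (Or.inl rfl))]
      simp only [valB, if_neg hj1,
        (propext (show (2*k+2 - 1 ≤ k+1) ↔ (2*k+2 - 1 ≤ k) from by omega)),
        eq_true (show ((2*k+2) % 2 = 0 ∧ (2*k+2)/2 ≤ k+1) from by omega),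
        eq_false (show ¬ ((2*k+2) % 2 = 0 ∧ (2*k+2)/2 ≤ k) from by omega),
        (propext (show ((2*k+2) % 3 = 0 ∧ (2*k+2)/3 ≤ k+1) ↔ ((2*k+2) % 3 = 0 ∧ (2*k+2)/3 ≤ k) from by omega)),
        show (2*k+2)/2 = k + 1 from by omega,
        if_true, if_false, min_def]
      split_ifs <;> omega
    · by_cases c3 : j = 3*k+3
      · -- j = 3k+3 only
        subst c3
        rw [if_pos (Or.inr (Or.inr rfl))]
        simp only [valB, if_neg hj1,
          (propext (show (3*k+3 - 1 ≤ k+1) ↔ (3*k+3 - 1 ≤ k) from by omega)),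
          (propext (show ((3*k+3) % 2 = 0 ∧ (3*k+3)/2 ≤ k+1) ↔ ((3*k+3) % 2 = 0 ∧ (3*k+3)/2 ≤ k) from by omega)),
          eq_true (show ((3*k+3) % 3 = 0 ∧ (3*k+3)/3 ≤ k+1) from by omega),
          eq_false (show ¬ ((3*k+3) % 3 = 0 ∧ (3*k+3)/3 ≤ k) from by omega),
          show (3*k+3)/3 = k + 1 from by omega,
          if_true, if_false, min_def]
        split_ifs <;> omega
      · -- no new predecessor
        rw [if_neg (by tauto)]
        simp only [valB, if_neg hj1,
          (propext (show (j - 1 ≤ k+1) ↔ (j - 1 ≤ k) from by omega)),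
          (propext (show (j % 2 = 0 ∧ j/2 ≤ k+1) ↔ (j % 2 = 0 ∧ j/2 ≤ k) from by omega)),
          (propext (show (j % 3 = 0 ∧ j/3 ≤ k+1) ↔ (j % 3 = 0 ∧ j/3 ≤ k) from by omega))]

-- one conditional relaxation of a single cell, stated on the map-over-range form
lemma relax_one (m t : Nat) (c : Int) (h : Nat → Int) :
    (if ((t : Nat) : Int) ≤ (m : Int) ∧ c < PySem.List.pyGetD ((List.range (m+1)).map h) ((t : Nat) : Int) 0 then
        PySem.List.pySetD ((List.range (m+1)).map h) ((t : Nat) : Int) c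
     else (List.range (m+1)).map h)
    = (List.range (m+1)).map (fun j => if j = t ∧ t ≤ m ∧ c < h t then c else h j) := by
  by_cases hb : t ≤ m
  · rw [pyGetD_map_range _ _ _ (by omega)]
    by_cases hc : c < h t
    · rw [if_pos ⟨by exact_mod_cast hb, hc⟩, pySetD_map_range]
      apply List.map_congr_left
      intro j hj
      by_cases hjt : j = t <;> simp [hjt, hb, hc]
    · rw [if_neg (fun hh => hc hh.2)]
      apply List.map_congr_left
      intro j hj
      by_cases hjt : j = t <;> simp [hjt, hc]
  · rw [if_neg (fun hh => hb (by exact_mod_cast hh.1))]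
    apply List.map_congr_left
    intro j hj
    simp [hb]

-- a strict-< relaxation of one cell is a pointwise min
lemma relax_val (m t j : Nat) (c : Int) (h : Nat → Int) :
    (if j = t ∧ t ≤ m ∧ c < h t then c else h j)
  = (if j = t ∧ t ≤ m then min (h j) c else h j) := by
  by_cases hjt : j = t
  · subst hjt
    by_cases hb : j ≤ m
    · simp only [hb, and_true, true_and, eq_self_iff_true, if_true, min_def]
      split_ifs <;> omega
    · simp [hb]
  · simp [hjt]

set_option maxHeartbeats 2000000 in
lemma stepB_tbl (m k : Nat) (hk : k + 1 ≤ m) :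
    stepB (m : Int) (tblB m k) ((k:Int)+1) = tblB m (k+1) := by
  unfold stepB tblB
  dsimp only
  have e3 : 3 * ((k:Int)+1) = ((3*k+3 : Nat) : Int) := by push_cast; ring
  have e2 : 2 * ((k:Int)+1) = ((2*k+2 : Nat) : Int) := by push_cast; ring
  have e1 : (k:Int)+1+1 = ((k+2 : Nat) : Int) := by push_cast; ring
  have e0 : (k:Int)+1 = ((k+1 : Nat) : Int) := by push_cast; ring
  rw [e3, e2, e1, e0,
      pyGetD_map_range _ _ _ (by omega), valB_eq_g m k (k+1) (by omega) (by omega),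
      relax_one, relax_one, relax_one]
  apply List.map_congr_left
  intro j hj
  rw [List.mem_range] at hj
  by_cases hj2 : j ≤ 1
  · have n1 : ¬ (j = k+2) := by omega
    have n2 : ¬ (j = 2*k+2) := by omega
    have n3 : ¬ (j = 3*k+3) := by omega
    simp only [n1, n2, n3, false_and, if_false]
    have : valB (m:Int) (k+1) j = valB (m:Int) k j := by
      match j with
      | 0 => simp [valB]
      | 1 => simp [valB]
    rw [this]
  · rw [valB_succ m k j (by omega)]
    simp only [relax_val, min_def]
    by_cases c1 : j = k+2
    · subst c1; split_ifs <;> omega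
    · by_cases c2 : j = 2*k+2
      · subst c2; split_ifs <;> omega
      · by_cases c3 : j = 3*k+3
        · subst c3; split_ifs <;> omega
        · split_ifs <;> omega

lemma B_loop (m : Nat) (hm : 1 ≤ m) : ∀ k : Nat, k ≤ m →
    (PySem.List.pyRange 1 ((k:Int)+1) 1).foldl (stepB (m : Int)) (tblB m 0) = tblB m k := by
  intro k
  induction k with
  | zero =>
    intro _
    rw [show ((0:Nat):Int)+1 = 1 by norm_num, PySem.List.pyRange_one_eq_nil (by norm_num)]
    rfl
  | succ k ih =>
    intro hle
    have hsplit : ((k+1 : Nat) : Int) + 1 = ((k : Int) + 1) + 1 := by push_cast; ring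
    rw [hsplit, PySem.List.pyRange_one_succ_right (by omega), List.foldl_append,
        ih (by omega)]
    exact stepB_tbl m k (by omega)

lemma fB_eq (m : Nat) (hm : 1 ≤ m) : f_alt (m : Int) = tblB m m := by
  rw [falt_eq_foldl m hm, init_eq_tblB m hm]
  exact B_loop m hm m (by omega)

lemma tblB_eq_tblA (m : Nat) : tblB m m = tblA (m+1) (m+1) := by
  unfold tblB tblA
  apply List.map_congr_left
  intro j hj
  rw [List.mem_range] at hj
  rw [valB_eq_g m m j (by omega) (by omega), if_pos hj]

-- ===== VERDICT (by name: the statement is the Claim_ definition above) =====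
theorem f_spec : Claim_equal_f := by
  unfold Claim_equal_f
  intro n _
  unfold Spec_f
  by_cases hn : n < 1
  · rw [f_eq_foldl, PySem.List.pyRange_one_eq_nil (by omega), f_alt, if_pos hn]
    rfl
  · obtain ⟨m, rfl⟩ : ∃ m : Nat, n = (m : Int) := ⟨n.toNat, by omega⟩
    have hm : 1 ≤ m := by omega
    rw [fA_eq m hm, fB_eq m hm, tblB_eq_tblA]
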